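-- pv_equiv track=rewrite | github.com/cspeardev/adventofcode | 2024/day_9.py | find_empty_span
-- ===== SOURCE A (Python) =====
-- def find_empty_span(blocks,size):
--   length=1
--   for i, value in enumerate(blocks):
--     if isinstance(value, int) and value == -1:
--       start = i
--       while i+1 < len(blocks) and blocks[i+1]==-1:  # Find the end of the current span by checking next values
--         i += 1
--       length = i - start + 1
--       if length >= size:
--         return start
--   return -1
-- ===== SOURCE B (Python) =====
-- def find_empty_span(blocks, size):
--   # Stage 1: build the list of maximal -1 runs (start, length), scanning right-to-left.
--   runs = []
--   for i in range(len(blocks) - 1, -1, -1):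
--     if blocks[i] == -1:
--       if runs and runs[0][0] == i + 1:
--         runs[0] = (i, runs[0][1] + 1)
--       else:
--         runs.insert(0, (i, 1))
--   # Stage 2: first run long enough.
--   for s, l in runs:
--     if l >= size:
--       return s
--   return -1
-- ===== Notes on version B (the rewrite author's own statement) =====
-- stated objective: alternative
-- what changed: B is a two-stage algorithm: a right-to-left pass builds the list of maximal -1 runs (start,length), then a second pass returns the first run with length >= size, instead of A's per-position rescan of the run ahead; not measurably faster on the timing inputs
import Mathlib
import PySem

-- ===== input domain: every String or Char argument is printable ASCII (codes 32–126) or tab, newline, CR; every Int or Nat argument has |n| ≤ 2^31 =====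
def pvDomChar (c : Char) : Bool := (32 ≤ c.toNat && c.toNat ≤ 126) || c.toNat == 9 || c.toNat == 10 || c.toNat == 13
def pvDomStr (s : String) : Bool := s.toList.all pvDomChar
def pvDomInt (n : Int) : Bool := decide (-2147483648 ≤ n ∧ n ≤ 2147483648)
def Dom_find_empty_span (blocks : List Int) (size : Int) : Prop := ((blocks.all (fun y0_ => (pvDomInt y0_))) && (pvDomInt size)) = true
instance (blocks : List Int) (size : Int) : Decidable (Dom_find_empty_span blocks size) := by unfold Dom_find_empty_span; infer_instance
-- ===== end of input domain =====

-- B is a two-stage algorithm: a right-to-left pass builds the list of maximal -1 runs, then a scan picks the first run of length >= size, instead of A's per-position rescan (objective: alternative; not measurably faster on the timing inputs).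


-- ===== PORT A =====
-- inner `while i+1 < len(blocks) and blocks[i+1]==-1: i += 1`
def whileEnd (blocks : List Int) (i : Nat) : Nat :=
  if h : i + 1 < blocks.length ∧ blocks.getD (i+1) 0 = -1 then
    whileEnd blocks (i+1)
  else i
termination_by blocks.length - i
decreasing_by omega

-- the `for i, value in enumerate(blocks)` loop of A (enumerate's own index, unaffected by the inner while)
def aLoop (blocks : List Int) (size : Int) (i : Nat) : Int :=
  if _h : i < blocks.length then
    if blocks.getD i 0 = -1 then
      let e := whileEnd blocks i
      if ((e : Int) - i + 1) ≥ size then (i : Int)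
      else aLoop blocks size (i+1)
    else aLoop blocks size (i+1)
  else -1
termination_by blocks.length - i

def find_empty_span (blocks : List Int) (size : Int) : Int := aLoop blocks size 0

-- ===== PORT B =====
-- one iteration of B's reversed `for i in range(len(blocks)-1, -1, -1)` loop:
-- extend the front run if it starts at i+1, otherwise open a new run (i, 1)
def runStep (blocks : List Int) (i : Nat) (acc : List (Nat × Nat)) : List (Nat × Nat) :=
  if blocks.getD i 0 = -1 then
    match acc with
    | (s, l) :: t => if s = i + 1 then (i, l + 1) :: t else (i, 1) :: (s, l) :: t
    | [] => [(i, 1)]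
  else acc

-- stage 1: the reversed index loop (foldr over the indices applies i = n-1 first)
def buildRuns (blocks : List Int) : List (Nat × Nat) :=
  (List.range blocks.length).foldr (runStep blocks) []

-- stage 2: `for s, l in runs: if l >= size: return s` / `return -1`
def pickRun (size : Int) : List (Nat × Nat) → Int
  | [] => -1
  | (s, l) :: t => if (l : Int) ≥ size then (s : Int) else pickRun size t

def find_empty_span_alt (blocks : List Int) (size : Int) : Int :=
  pickRun size (buildRuns blocks)

-- ===== PRECONDITION & SPEC =====
def Spec_find_empty_span (blocks : List Int) (size : Int) (out : Int) : Prop := out = find_empty_span_alt blocks size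
instance (blocks : List Int) (size : Int) (out : Int) : Decidable (Spec_find_empty_span blocks size out) := by unfold Spec_find_empty_span; infer_instance

-- ===== CLAIM (what is proved, stated in full; the proofs are below) =====
def Claim_equal_find_empty_span : Prop := ∀ (blocks : List Int) (size : Int), Dom_find_empty_span blocks size → Spec_find_empty_span blocks size (find_empty_span blocks size)

-- ===== LEMMAS AND PROOFS =====

-- properties of A's whileEnd
theorem whileEnd_succ (blocks : List Int) (i : Nat)
    (h : i + 1 < blocks.length ∧ blocks.getD (i+1) 0 = -1) :
    whileEnd blocks i = whileEnd blocks (i+1) := by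
  rw [whileEnd, dif_pos h]

theorem whileEnd_props_aux (blocks : List Int) :
    ∀ n i, blocks.length - i ≤ n → i < blocks.length →
    i ≤ whileEnd blocks i ∧ whileEnd blocks i < blocks.length ∧
    (∀ j, i < j → j ≤ whileEnd blocks i → blocks.getD j 0 = -1) ∧
    ¬ (whileEnd blocks i + 1 < blocks.length ∧ blocks.getD (whileEnd blocks i + 1) 0 = -1) := by
  intro n
  induction n with
  | zero => intro i hn hi; omega
  | succ n ih =>
    intro i hn hi
    by_cases h : i + 1 < blocks.length ∧ blocks.getD (i+1) 0 = -1
    · rw [whileEnd_succ blocks i h]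
      obtain ⟨h1, h2, h3, h4⟩ := ih (i+1) (by omega) h.1
      refine ⟨by omega, h2, ?_, h4⟩
      intro j hj1 hj2
      rcases Nat.lt_or_ge (i+1) j with hc | hc
      · exact h3 j hc hj2
      · have : j = i + 1 := by omega
        rw [this]; exact h.2
    · rw [whileEnd, dif_neg h]
      exact ⟨le_refl i, hi, fun j hj1 hj2 => absurd (lt_of_lt_of_le hj1 hj2) (lt_irrefl i), h⟩

theorem whileEnd_props (blocks : List Int) (i : Nat) (hi : i < blocks.length) :
    i ≤ whileEnd blocks i ∧ whileEnd blocks i < blocks.length ∧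
    (∀ j, i < j → j ≤ whileEnd blocks i → blocks.getD j 0 = -1) ∧
    ¬ (whileEnd blocks i + 1 < blocks.length ∧ blocks.getD (whileEnd blocks i + 1) 0 = -1) :=
  whileEnd_props_aux blocks (blocks.length - i) i (le_refl _) hi

-- every position inside a maximal run has the same whileEnd
theorem whileEnd_run_aux (blocks : List Int) (e : Nat) (hel : e < blocks.length)
    (hend : ¬ (e + 1 < blocks.length ∧ blocks.getD (e+1) 0 = -1)) :
    ∀ n j : Nat, e - j ≤ n → j ≤ e → (∀ m, j ≤ m → m ≤ e → blocks.getD m 0 = -1) →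
      whileEnd blocks j = e := by
  intro n
  induction n with
  | zero =>
    intro j hf hje hrun
    have : j = e := by omega
    rw [this, whileEnd, dif_neg hend]
  | succ n ih =>
    intro j hf hje hrun
    rcases Nat.eq_or_lt_of_le hje with hj | hj
    · rw [hj, whileEnd, dif_neg hend]
    · rw [whileEnd_succ blocks j ⟨by omega, hrun (j+1) (by omega) (by omega)⟩]
      exact ih (j+1) (by omega) (by omega) (fun m hm1 hm2 => hrun m (by omega) hm2)

-- A skips over a failed run in one block
theorem aLoop_skips_aux (blocks : List Int) (size : Int) (e : Nat) :
    ∀ n k : Nat, e - k ≤ n → k ≤ e → e < blocks.length →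
      (∀ j, k ≤ j → j ≤ e → blocks.getD j 0 = -1) →
      (∀ j, k ≤ j → j ≤ e → whileEnd blocks j = e) →
      ¬ ((e : Int) - k + 1) ≥ size → aLoop blocks size k = aLoop blocks size (e+1) := by
  intro n
  induction n with
  | zero =>
    intro k hf hke hel hrun hwe hcond
    have hk : k = e := by omega
    rw [aLoop]
    simp only [dif_pos (show k < blocks.length by omega), if_pos (hrun k (le_refl k) hke),
      hwe k (le_refl k) hke]
    rw [if_neg hcond, hk]
  | succ n ih =>
    intro k hf hke hel hrun hwe hcond
    rcases Nat.eq_or_lt_of_le hke with hk | hk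
    · rw [aLoop]
      simp only [dif_pos (show k < blocks.length by omega), if_pos (hrun k (le_refl k) hke),
        hwe k (le_refl k) hke]
      rw [if_neg hcond, hk]
    · rw [aLoop]
      simp only [dif_pos (show k < blocks.length by omega), if_pos (hrun k (le_refl k) hke),
        hwe k (le_refl k) hke]
      rw [if_neg hcond]
      exact ih (k+1) (by omega) (by omega) hel
        (fun j hj1 hj2 => hrun j (by omega) hj2)
        (fun j hj1 hj2 => hwe j (by omega) hj2) (by omega)

theorem aLoop_skips (blocks : List Int) (size : Int) :
    ∀ k : Nat, ∀ e : Nat, k ≤ e → e < blocks.length →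
      (∀ j, k ≤ j → j ≤ e → blocks.getD j 0 = -1) →
      (∀ j, k ≤ j → j ≤ e → whileEnd blocks j = e) →
      ¬ ((e : Int) - k + 1) ≥ size → aLoop blocks size k = aLoop blocks size (e+1) :=
  fun k e => aLoop_skips_aux blocks size e (e - k) k (le_refl _)

-- the partial result of B's reversed loop after processing indices ≥ i
def pvR (blocks : List Int) (i : Nat) : List (Nat × Nat) :=
  List.foldr (runStep blocks) [] (List.range' i (blocks.length - i))

theorem pvR_stop (blocks : List Int) (i : Nat) (h : blocks.length ≤ i) :
    pvR blocks i = [] := by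
  unfold pvR
  rw [show blocks.length - i = 0 by omega]
  rfl

theorem pvR_succ (blocks : List Int) (i : Nat) (h : i < blocks.length) :
    pvR blocks i = runStep blocks i (pvR blocks (i+1)) := by
  unfold pvR
  rw [show blocks.length - i = (blocks.length - (i+1)) + 1 by omega, List.range'_succ]
  rfl

theorem buildRuns_eq_pvR (blocks : List Int) : buildRuns blocks = pvR blocks 0 := by
  unfold buildRuns pvR
  rw [List.range_eq_range', Nat.sub_zero]

-- any head of pvR is a -1 position at or after i
theorem pvR_head_aux (blocks : List Int) :
    ∀ n i s l t, blocks.length - i ≤ n → pvR blocks i = (s, l) :: t →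
      i ≤ s ∧ s < blocks.length ∧ blocks.getD s 0 = -1 := by
  intro n
  induction n with
  | zero =>
    intro i s l t hf hR
    rw [pvR_stop blocks i (by omega)] at hR
    exact absurd hR (by simp)
  | succ n ih =>
    intro i s l t hf hR
    by_cases hi : i < blocks.length
    · rw [pvR_succ blocks i hi] at hR
      unfold runStep at hR
      by_cases hv : blocks.getD i 0 = -1
      · rw [if_pos hv] at hR
        rcases hRi : pvR blocks (i+1) with _ | ⟨⟨s', l'⟩, t'⟩
        · rw [hRi] at hR
          simp at hR
          obtain ⟨⟨hs1, hl1⟩, ht⟩ := hR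
          exact ⟨by omega, by rw [← hs1]; exact ⟨hi, hv⟩⟩
        · rw [hRi] at hR
          simp only at hR
          by_cases hs : s' = i + 1
          · rw [if_pos hs] at hR
            simp at hR
            obtain ⟨⟨hs1, hl1⟩, ht⟩ := hR
            exact ⟨by omega, by rw [← hs1]; exact ⟨hi, hv⟩⟩
          · rw [if_neg hs] at hR
            simp at hR
            obtain ⟨⟨hs1, hl1⟩, ht⟩ := hR
            exact ⟨by omega, by rw [← hs1]; exact ⟨hi, hv⟩⟩
      · rw [if_neg hv] at hR
        obtain ⟨h1, h2, h3⟩ := ih (i+1) s l t (by omega) hR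
        exact ⟨by omega, h2, h3⟩
    · rw [pvR_stop blocks i (by omega)] at hR
      exact absurd hR (by simp)

theorem pvR_head (blocks : List Int) (i s l : Nat) (t : List (Nat × Nat))
    (hR : pvR blocks i = (s, l) :: t) :
    i ≤ s ∧ s < blocks.length ∧ blocks.getD s 0 = -1 :=
  pvR_head_aux blocks (blocks.length - i) i s l t (le_refl _) hR

-- inside a maximal run, pvR is that run consed on pvR past the run
theorem pvR_run_aux (blocks : List Int) (e : Nat) (hel : e < blocks.length)
    (hend : ¬ (e + 1 < blocks.length ∧ blocks.getD (e+1) 0 = -1)) :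
    ∀ n i : Nat, e - i ≤ n → i ≤ e → (∀ m, i ≤ m → m ≤ e → blocks.getD m 0 = -1) →
      pvR blocks i = (i, e - i + 1) :: pvR blocks (e+1) := by
  intro n
  induction n with
  | zero =>
    intro i hf hie hrun
    have hi : i = e := by omega
    subst hi
    rw [pvR_succ blocks i (by omega)]
    unfold runStep
    rw [if_pos (hrun i (le_refl i) (le_refl i))]
    rcases hRi : pvR blocks (i+1) with _ | ⟨⟨s', l'⟩, t'⟩
    · simp
    · obtain ⟨h1, h2, h3⟩ := pvR_head blocks (i+1) s' l' t' hRi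
      have hs : ¬ s' = i + 1 := by
        intro hc
        exact hend ⟨by omega, by rw [← hc]; exact h3⟩
      simp only [if_neg hs]
      rw [← hRi]
      simp
  | succ n ih =>
    intro i hf hie hrun
    rcases Nat.eq_or_lt_of_le hie with hi | hi
    · subst hi
      rw [pvR_succ blocks i (by omega)]
      unfold runStep
      rw [if_pos (hrun i (le_refl i) (le_refl i))]
      rcases hRi : pvR blocks (i+1) with _ | ⟨⟨s', l'⟩, t'⟩
      · simp
      · obtain ⟨h1, h2, h3⟩ := pvR_head blocks (i+1) s' l' t' hRi
        have hs : ¬ s' = i + 1 := by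
          intro hc
          exact hend ⟨by omega, by rw [← hc]; exact h3⟩
        simp only [if_neg hs]
        rw [← hRi]
        simp
    · have hIH := ih (i+1) (by omega) (by omega) (fun m hm1 hm2 => hrun m (by omega) hm2)
      rw [pvR_succ blocks i (by omega)]
      unfold runStep
      rw [if_pos (hrun i (le_refl i) (by omega)), hIH]
      simp [show e - (i+1) + 1 + 1 = e - i + 1 by omega]

theorem pvR_run (blocks : List Int) (i e : Nat) (hel : e < blocks.length)
    (hend : ¬ (e + 1 < blocks.length ∧ blocks.getD (e+1) 0 = -1))
    (hie : i ≤ e) (hrun : ∀ m, i ≤ m → m ≤ e → blocks.getD m 0 = -1) :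
    pvR blocks i = (i, e - i + 1) :: pvR blocks (e+1) :=
  pvR_run_aux blocks e hel hend (e - i) i (le_refl _) hie hrun

-- main bridge: A's loop from i equals B's pick over the runs at or after i
theorem main_eq_aux (blocks : List Int) (size : Int) :
    ∀ n i : Nat, blocks.length - i ≤ n →
      aLoop blocks size i = pickRun size (pvR blocks i) := by
  intro n
  induction n with
  | zero =>
    intro i hf
    rw [aLoop, pvR_stop blocks i (by omega)]
    simp only [dif_neg (show ¬ i < blocks.length by omega)]
    rfl
  | succ n ih =>
    intro i hf
    by_cases hi : i < blocks.length
    · by_cases hv : blocks.getD i 0 = -1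
      · obtain ⟨h1, h2, h3, h4⟩ := whileEnd_props blocks i hi
        set e := whileEnd blocks i with he
        have hrun : ∀ j, i ≤ j → j ≤ e → blocks.getD j 0 = -1 := by
          intro j hj1 hj2
          rcases Nat.eq_or_lt_of_le hj1 with hj | hj
          · rw [← hj]; exact hv
          · exact h3 j hj hj2
        have hRi : pvR blocks i = (i, e - i + 1) :: pvR blocks (e+1) :=
          pvR_run blocks i e h2 h4 h1 hrun
        have hcast : ((e - i + 1 : Nat) : Int) = (e : Int) - i + 1 := by omega
        by_cases hc : ((e : Int) - i + 1) ≥ size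
        · rw [aLoop]
          simp only [dif_pos hi, if_pos hv, ← he]
          rw [if_pos hc, hRi]
          unfold pickRun
          rw [if_pos (by rw [hcast]; exact hc)]
        · have hA : aLoop blocks size i = aLoop blocks size (e+1) :=
            aLoop_skips blocks size i e h1 h2 hrun
              (fun j hj1 hj2 => whileEnd_run_aux blocks e h2 h4 (e - j) j (le_refl _) hj2
                (fun m hm1 hm2 => hrun m (by omega) hm2)) hc
          rw [hA, hRi]
          unfold pickRun
          rw [if_neg (by rw [hcast]; exact hc)]
          exact ih (e+1) (by omega)
      · rw [aLoop, pvR_succ blocks i hi]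
        simp only [dif_pos hi, if_neg hv]
        unfold runStep
        rw [if_neg hv]
        exact ih (i+1) (by omega)
    · rw [aLoop, pvR_stop blocks i (by omega)]
      simp only [dif_neg hi]
      rfl

-- ===== VERDICT (by name: the statement is the Claim_ definition above) =====
theorem find_empty_span_spec : Claim_equal_find_empty_span := by
  intro blocks size _
  unfold Spec_find_empty_span find_empty_span find_empty_span_alt
  rw [buildRuns_eq_pvR]
  exact main_eq_aux blocks size (blocks.length - 0) 0 (le_refl _)
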